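-- pv_equiv track=rewrite | github.com/Serafima-art/matyunya-bot-clean | matunya_bot_final/non_generators/task_6/validators/mixed_fractions_validator.py | _is_finite_decimal
-- ===== SOURCE A (Python) =====
-- def _is_finite_decimal(den: int) -> bool:
--     den = abs(int(den))
--     if den == 0:
--         return False
--     while den % 2 == 0:
--         den //= 2
--     while den % 5 == 0:
--         den //= 5
--     return den == 1
-- ===== SOURCE B (Python) =====
-- def _is_finite_decimal(den: int) -> bool:
--     den = abs(int(den))
--     if den == 0:
--         return False
--     return 10 ** den.bit_length() % den == 0
-- ===== Notes on version B (the rewrite author's own statement) =====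
-- stated objective: simpler
-- what changed: Replaces the two factor-stripping while-loops by a single loop-free divisibility test: the positive denominator divides ten raised to its bit length exactly when its only prime factors are two and five.
import Mathlib
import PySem

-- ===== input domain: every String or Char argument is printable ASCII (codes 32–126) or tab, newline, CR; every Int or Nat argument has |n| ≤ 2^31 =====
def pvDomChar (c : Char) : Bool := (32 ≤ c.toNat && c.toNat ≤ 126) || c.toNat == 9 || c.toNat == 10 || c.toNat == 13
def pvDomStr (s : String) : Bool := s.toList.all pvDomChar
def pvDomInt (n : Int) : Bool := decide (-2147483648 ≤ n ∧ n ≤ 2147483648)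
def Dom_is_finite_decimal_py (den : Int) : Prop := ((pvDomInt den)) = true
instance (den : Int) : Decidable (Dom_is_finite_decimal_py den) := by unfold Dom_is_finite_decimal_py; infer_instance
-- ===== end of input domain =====

-- B replaces A's two factor-stripping while-loops by a loop-free divisibility test
-- (den ∣ 10^bit_length(den)); objective: simpler (not claimed faster).

-- ===== PORT A =====
-- A's `abs(int(den))` is nonnegative, so the loops are carried out on `den.natAbs : Nat`,
-- where Nat `%`/`/` coincide with Python's on nonnegative values.
-- `while den % p == 0: den //= p`; the `2 ≤ p ∧ den ≠ 0` conjuncts only make the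
-- recursion total (A calls it with p = 2, 5 and den > 0, where Python's loop terminates).
def stripF (p n : Nat) : Nat :=
  if h : 2 ≤ p ∧ n ≠ 0 ∧ n % p = 0 then stripF p (n / p) else n
termination_by n
decreasing_by exact Nat.div_lt_self (Nat.pos_of_ne_zero h.2.1) h.1

def is_finite_decimal_py (den : Int) : Bool :=
  let d := den.natAbs            -- den = abs(int(den))
  if d = 0 then false            -- if den == 0: return False
  else
    let d1 := stripF 2 d         -- while den % 2 == 0: den //= 2
    let d2 := stripF 5 d1        -- while den % 5 == 0: den //= 5
    d2 == 1                      -- return den == 1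

-- ===== PORT B =====
-- Python's n.bit_length() for n ≥ 0 is Nat.size n (0 for 0, ⌊log2 n⌋+1 otherwise).
def is_finite_decimal_py_alt (den : Int) : Bool :=
  let d := den.natAbs            -- den = abs(int(den))
  if d = 0 then false            -- if den == 0: return False
  else (10 ^ Nat.size d) % d == 0  -- return 10 ** den.bit_length() % den == 0

-- ===== PRECONDITION & SPEC =====
def Spec_is_finite_decimal_py (den : Int) (out : Bool) : Prop := out = is_finite_decimal_py_alt den
instance (den : Int) (out : Bool) : Decidable (Spec_is_finite_decimal_py den out) := by unfold Spec_is_finite_decimal_py; infer_instance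

-- ===== CLAIM (what is proved, stated in full; the proofs are below) =====
def Claim_equal_is_finite_decimal_py : Prop := ∀ (den : Int), Dom_is_finite_decimal_py den → Spec_is_finite_decimal_py den (is_finite_decimal_py den)

-- ===== LEMMAS AND PROOFS =====

-- "n's only prime factors are 2 and 5"
def OnlyTwoFive (n : Nat) : Prop := ∀ p, Nat.Prime p → p ∣ n → p ∣ 10

lemma onlyTwoFive_div_iff (q n : Nat) (hq10 : q ∣ 10) (hqn : q ∣ n) :
    OnlyTwoFive n ↔ OnlyTwoFive (n / q) := by
  constructor
  · intro h p pp hpd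
    exact h p pp (hpd.trans (Nat.div_dvd_of_dvd hqn))
  · intro h p pp hpn
    by_cases hpq : p ∣ q
    · exact hpq.trans hq10
    · have hco : Nat.Coprime p q := (Nat.Prime.coprime_iff_not_dvd pp).mpr hpq
      have hmul : p ∣ q * (n / q) := by rwa [Nat.mul_div_cancel' hqn]
      exact h p pp (hco.dvd_of_dvd_mul_left hmul)

lemma stripF_spec (q : Nat) (hq10 : q ∣ 10) (hq : 2 ≤ q) :
    ∀ n, n ≠ 0 →
      stripF q n ≠ 0 ∧ ¬ q ∣ stripF q n ∧ (OnlyTwoFive n ↔ OnlyTwoFive (stripF q n)) ∧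
        stripF q n ∣ n := by
  intro n
  induction n using Nat.strong_induction_on with
  | _ n ih =>
    intro hn
    rw [stripF]
    split
    · rename_i h
      have hdvd : q ∣ n := (Nat.dvd_iff_mod_eq_zero).mpr h.2.2
      have hlt : n / q < n := Nat.div_lt_self (Nat.pos_of_ne_zero hn) hq
      have hne : n / q ≠ 0 := by
        have := Nat.div_pos (Nat.le_of_dvd (Nat.pos_of_ne_zero hn) hdvd) (by omega)
        omega
      obtain ⟨h0, h1, h2, h3⟩ := ih (n / q) hlt hne
      exact ⟨h0, h1, (onlyTwoFive_div_iff q n hq10 hdvd).trans h2,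
        h3.trans (Nat.div_dvd_of_dvd hdvd)⟩
    · rename_i h
      have hmod : n % q ≠ 0 := by
        intro hc; exact h ⟨hq, hn, hc⟩
      exact ⟨hn, fun hd => hmod ((Nat.dvd_iff_mod_eq_zero).mp hd),
        Iff.rfl, dvd_refl n⟩

lemma prime_dvd_ten (p : Nat) (pp : Nat.Prime p) (hp : p ∣ 10) : p = 2 ∨ p = 5 := by
  have : p ∣ 2 * 5 := by norm_num at hp ⊢; exact hp
  rcases (Nat.Prime.dvd_mul pp).mp this with h | h
  · left; exact (Nat.prime_dvd_prime_iff_eq pp Nat.prime_two).mp h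
  · right; exact (Nat.prime_dvd_prime_iff_eq pp (by norm_num)).mp h

-- A's result characterised: after stripping 2s then 5s, the residue is 1 iff OnlyTwoFive.
lemma stripA_eq_one_iff (n : Nat) (hn : n ≠ 0) :
    stripF 5 (stripF 2 n) = 1 ↔ OnlyTwoFive n := by
  obtain ⟨h0, h1, h2, _⟩ := stripF_spec 2 (by norm_num) (by norm_num) n hn
  obtain ⟨g0, g1, g2, g3⟩ := stripF_spec 5 (by norm_num) (by norm_num) (stripF 2 n) h0
  constructor
  · intro he
    refine (h2.trans g2).mpr ?_
    intro p pp hpd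
    rw [he] at hpd
    exact absurd (Nat.eq_one_of_dvd_one hpd) pp.ne_one
  · intro hP
    by_contra hne
    obtain ⟨p, pp, hpd⟩ := Nat.exists_prime_and_dvd hne
    have h10 : p ∣ 10 := ((h2.trans g2).mp hP) p pp hpd
    rcases prime_dvd_ten p pp h10 with rfl | rfl
    · exact h1 (hpd.trans g3)
    · exact g1 hpd

lemma onlyTwoFive_pow (n : Nat) (hn : n ≠ 0) (h : OnlyTwoFive n) :
    ∃ a b, n = 2 ^ a * 5 ^ b := by
  induction n using Nat.strong_induction_on with
  | _ n ih =>
    by_cases h1 : n = 1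
    · exact ⟨0, 0, by simp [h1]⟩
    · obtain ⟨p, pp, hpd⟩ := Nat.exists_prime_and_dvd h1
      have hp10 := h p pp hpd
      have hlt : n / p < n := Nat.div_lt_self (Nat.pos_of_ne_zero hn) pp.two_le
      have hne : n / p ≠ 0 := by
        have := Nat.div_pos (Nat.le_of_dvd (Nat.pos_of_ne_zero hn) hpd) pp.pos
        omega
      have hP : OnlyTwoFive (n / p) := (onlyTwoFive_div_iff p n hp10 hpd).mp h
      obtain ⟨a, b, hab⟩ := ih (n / p) hlt hne hP
      have hmul : n = p * (n / p) := (Nat.mul_div_cancel' hpd).symm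
      rcases prime_dvd_ten p pp hp10 with rfl | rfl
      · exact ⟨a + 1, b, by rw [hmul, hab]; ring⟩
      · exact ⟨a, b + 1, by rw [hmul, hab]; ring⟩

-- B's result characterised: n divides 10^(size n) iff OnlyTwoFive.
lemma pow_mod_eq_zero_iff (n : Nat) (hn : n ≠ 0) :
    (10 ^ Nat.size n) % n = 0 ↔ OnlyTwoFive n := by
  rw [← Nat.dvd_iff_mod_eq_zero]
  constructor
  · intro hd p pp hpn
    exact pp.dvd_of_dvd_pow (hpn.trans hd)
  · intro hP
    obtain ⟨a, b, rfl⟩ := onlyTwoFive_pow n hn hP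
    have hle : 2 ^ (a + b) ≤ 2 ^ a * 5 ^ b := by
      rw [pow_add]
      exact Nat.mul_le_mul_left _ (Nat.pow_le_pow_left (by norm_num) b)
    have hsz : a + b < Nat.size (2 ^ a * 5 ^ b) := Nat.lt_size.mpr hle
    have hd1 : 2 ^ a * 5 ^ b ∣ 10 ^ (a + b) := by
      have : (10 : Nat) ^ (a + b) = 2 ^ (a + b) * 5 ^ (a + b) := by
        rw [← Nat.mul_pow]
      rw [this]
      exact Nat.mul_dvd_mul (Nat.pow_dvd_pow 2 (by omega)) (Nat.pow_dvd_pow 5 (by omega))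
    exact hd1.trans (Nat.pow_dvd_pow 10 (Nat.le_of_lt hsz))

-- ===== VERDICT (by name: the statement is the Claim_ definition above) =====
theorem is_finite_decimal_py_spec : Claim_equal_is_finite_decimal_py := by
  intro den _
  unfold Spec_is_finite_decimal_py is_finite_decimal_py is_finite_decimal_py_alt
  by_cases hz : den.natAbs = 0
  · simp [hz]
  · simp only [if_neg hz]
    rw [Bool.eq_iff_iff]
    simp only [beq_iff_eq]
    exact (stripA_eq_one_iff den.natAbs hz).trans (pow_mod_eq_zero_iff den.natAbs hz).symm
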